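-- pv_equiv track=rewrite | github.com/darylhjd/ctci | recursion_and_dynamic_programming/recursive_multiply.py | recursive_multiply
-- ===== SOURCE A (Python) =====
-- def recursive_multiply(a, b):
--     """Write a recursive function to multiply two positive integers without using
--     the * operator (or / operator) . You can use addition, subtraction, and bit shifting, but you should
--     minimize the number of those operations."""
--     if b == 0 or a == 0:
--         return 0
--     elif a == 1:
--         return b
--
--     # Let a be the multiplier and b be the multiplied.
--     # We divide a by 2.
--     mult = a >> 1
--     res = recursive_multiply(mult, b)
--     if a % 2 == 0:
--         return res + res
--     else:
--         return res + res + b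
-- ===== SOURCE B (Python) =====
-- def recursive_multiply(a, b):
--     """Iterative Russian-peasant multiplication: one loop, no recursion."""
--     res = 0
--     while a > 0:
--         if a & 1:
--             res += b
--         a >>= 1
--         b <<= 1
--     return res
-- ===== Notes on version B (the rewrite author's own statement) =====
-- stated objective: simpler
-- what changed: Replaces the recursive halving (recursion depth O(log a) with post-recursion combination res+res(+b)) by a single iterative Russian-peasant loop accumulating into res.
import Mathlib
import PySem

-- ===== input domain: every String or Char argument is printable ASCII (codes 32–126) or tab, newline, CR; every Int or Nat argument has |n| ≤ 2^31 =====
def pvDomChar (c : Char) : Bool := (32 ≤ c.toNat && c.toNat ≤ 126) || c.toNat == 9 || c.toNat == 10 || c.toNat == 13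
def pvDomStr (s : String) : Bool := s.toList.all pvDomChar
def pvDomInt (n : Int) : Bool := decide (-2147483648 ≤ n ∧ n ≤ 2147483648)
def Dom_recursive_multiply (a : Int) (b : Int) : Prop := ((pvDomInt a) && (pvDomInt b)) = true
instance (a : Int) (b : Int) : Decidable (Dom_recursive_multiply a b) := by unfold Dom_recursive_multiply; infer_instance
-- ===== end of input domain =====

-- B replaces A's recursive halving by a single iterative Russian-peasant loop (same cost, simpler).


-- ===== PORT A =====
-- Fuel-based transliteration of A's recursion (fuel a.natAbs+1 is enough on the admitted
-- inputs, proved below); `a >> 1` = floordiv a 2, `a % 2` = PySem.Int.mod a 2.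
def recursive_multiply_goA (fuel : Nat) (a b : Int) : Int :=
  match fuel with
  | 0 => 0
  | fuel + 1 =>
    if b = 0 ∨ a = 0 then 0
    else if a = 1 then b
    else
      let mult := PySem.Int.floordiv a 2
      let res := recursive_multiply_goA fuel mult b
      if PySem.Int.mod a 2 = 0 then res + res else res + res + b

def recursive_multiply (a : Int) (b : Int) : Int :=
  recursive_multiply_goA (a.natAbs + 1) a b

-- ===== PORT B =====
-- B's while-loop: `while a > 0: if a & 1: res += b; a >>= 1; b <<= 1`.
def recursive_multiply_goB (a b res : Int) : Int :=
  if h : 0 < a then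
    recursive_multiply_goB (PySem.Int.floordiv a 2) (b * 2)
      (if PySem.Int.mod a 2 = 1 then res + b else res)
  else res
termination_by a.toNat
decreasing_by
  have : PySem.Int.floordiv a 2 = a / 2 := PySem.Int.floordiv_eq_ediv_of_pos (by omega)
  rw [this]; omega

def recursive_multiply_alt (a : Int) (b : Int) : Int :=
  recursive_multiply_goB a b 0

-- ===== PRECONDITION & SPEC =====
-- Pre_ excludes exactly a < 0 ∧ b ≠ 0, where A raises RecursionError (a >> 1 never reaches 0 for negative a).
def Pre_recursive_multiply (a : Int) (b : Int) : Prop := 0 ≤ a ∨ b = 0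
instance (a : Int) (b : Int) : Decidable (Pre_recursive_multiply a b) := by
  unfold Pre_recursive_multiply; infer_instance

def pvWitness_recursive_multiply : Int × Int := (13, -7)

def Spec_recursive_multiply (a : Int) (b : Int) (out : Int) : Prop := out = recursive_multiply_alt a b
instance (a : Int) (b : Int) (out : Int) : Decidable (Spec_recursive_multiply a b out) := by
  unfold Spec_recursive_multiply; infer_instance

-- ===== CLAIM (what is proved, stated in full; the proofs are below) =====
def Claim_equal_recursive_multiply : Prop :=
  ∀ (a : Int) (b : Int), Dom_recursive_multiply a b → Pre_recursive_multiply a b →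
    Spec_recursive_multiply a b (recursive_multiply a b)

-- ===== LEMMAS AND PROOFS =====

-- A computes a * b given enough fuel, for 0 ≤ a.
theorem recursive_multiply_goA_eq (fuel : Nat) :
    ∀ (a b : Int), 0 ≤ a → a.natAbs < fuel → recursive_multiply_goA fuel a b = a * b := by
  induction fuel with
  | zero => intro a b _ h; omega
  | succ f ih =>
    intro a b ha hf
    rw [recursive_multiply_goA]
    by_cases h0 : b = 0 ∨ a = 0
    · simp only [h0, if_true]
      rcases h0 with h | h <;> simp [h]
    · simp only [h0, if_false]
      by_cases h1 : a = 1
      · simp [h1]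
      · simp only [h1, if_false]
        have ha2 : 2 ≤ a := by push Not at h0; omega
        have hq : PySem.Int.floordiv a 2 = a / 2 :=
          PySem.Int.floordiv_eq_ediv_of_pos (by omega)
        have hr : PySem.Int.mod a 2 = a % 2 :=
          PySem.Int.mod_eq_emod_of_pos (by omega)
        have hrec : recursive_multiply_goA f (a / 2) b = (a / 2) * b := by
          apply ih _ _ (by omega) (by omega)
        simp only [hq, hr, hrec]
        set q := a / 2 with hqd
        by_cases hm : a % 2 = 0
        · simp only [hm, if_true]
          rw [show a = 2 * q from by omega]; ring
        · have hm1 : a % 2 = 1 := by omega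
          simp only [hm1]
          norm_num
          rw [show a = 2 * q + 1 from by omega]; ring

-- B's loop accumulates res + a * b, for 0 ≤ a (for a ≤ 0 it returns res at once).
theorem recursive_multiply_goB_eq (n : Nat) :
    ∀ (a b res : Int), 0 ≤ a → a.toNat = n → recursive_multiply_goB a b res = res + a * b := by
  induction n using Nat.strong_induction_on with
  | _ n ih =>
    intro a b res ha hn
    rw [recursive_multiply_goB]
    by_cases h : 0 < a
    · simp only [dif_pos h]
      have hq : PySem.Int.floordiv a 2 = a / 2 :=
        PySem.Int.floordiv_eq_ediv_of_pos (by omega)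
      have hr : PySem.Int.mod a 2 = a % 2 :=
        PySem.Int.mod_eq_emod_of_pos (by omega)
      rw [hq, hr]
      rw [ih (a / 2).toNat (by omega) _ _ _ (by omega) rfl]
      set q := a / 2 with hqd
      by_cases hm : a % 2 = 1
      · simp only [hm, if_true]
        norm_num
        rw [show a = 2 * q + 1 from by omega]; ring
      · have hm0 : a % 2 = 0 := by omega
        simp only [hm0]
        norm_num
        rw [show a = 2 * q from by omega]; ring
    · simp [dif_neg h]
      have : a = 0 := by omega
      simp [this]

-- ===== VERDICT (by name: the statement is the Claim_ definition above) =====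
theorem recursive_multiply_spec : Claim_equal_recursive_multiply := by
  intro a b _ hpre
  unfold Spec_recursive_multiply recursive_multiply recursive_multiply_alt
  by_cases ha : 0 ≤ a
  · rw [recursive_multiply_goA_eq (a.natAbs + 1) a b ha (by omega),
        recursive_multiply_goB_eq a.toNat a b 0 ha rfl]
    ring
  · -- a < 0, so Pre_ forces b = 0: A's first branch returns 0, B's loop is skipped.
    rcases hpre with h | hb
    · omega
    · subst hb
      rw [recursive_multiply_goA, recursive_multiply_goB]
      simp [show ¬ (0:Int) < a by omega]
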